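-- pv_equiv track=rewrite | github.com/lulongtw/practice | python/ltc_code/ch10/coci10c1p2_n3.py | grade_of
-- ===== SOURCE A (Python) =====
-- def grade_of(desks, left, right):
--     """
--     desks is a list of desks; each desk is a list of two grades.
--     left and right are valid indices in desks.
--
--     If a grade appears in all desks[left:right+1], return the minimum such grade;
--     otherwise, return 0.
--     """
--     grades = [desks[left][0], desks[left][1]]
--     grades.sort()  # So that we process smaller grade first
--     for grade in grades:
--         ok = True
--         for i in range(left, right + 1):
--             if desks[i][0] != grade and desks[i][1] != grade:
--                 ok = False
--         if ok:
--             return grade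
--     return 0
-- ===== SOURCE B (Python) =====
-- def grade_of(desks, left, right):
--     cands = {desks[left][0], desks[left][1]}
--     for desk in desks[left:right + 1]:
--         cands &= {desk[0], desk[1]}
--     return min(cands) if cands else 0
-- ===== Notes on version B (the rewrite author's own statement) =====
-- stated objective: simpler
-- what changed: Replaces A's two per-candidate full scans over the range with a single pass that narrows a candidate set by intersection, then returns its minimum; Pre_ excludes negative or out-of-range left/right where A's index wraparound and B's slice clamping read accidentally different desks, and desks with fewer than two grades (A raises there).
-- outside the precondition, e.g. on grade_of([[1, 2], [3, 4]], -1, 1): A returns 0, B returns 3; on grade_of([[1, 2], [3, 4], [1, 2]], 0, -2): A returns 1, B returns 0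
import Mathlib
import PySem

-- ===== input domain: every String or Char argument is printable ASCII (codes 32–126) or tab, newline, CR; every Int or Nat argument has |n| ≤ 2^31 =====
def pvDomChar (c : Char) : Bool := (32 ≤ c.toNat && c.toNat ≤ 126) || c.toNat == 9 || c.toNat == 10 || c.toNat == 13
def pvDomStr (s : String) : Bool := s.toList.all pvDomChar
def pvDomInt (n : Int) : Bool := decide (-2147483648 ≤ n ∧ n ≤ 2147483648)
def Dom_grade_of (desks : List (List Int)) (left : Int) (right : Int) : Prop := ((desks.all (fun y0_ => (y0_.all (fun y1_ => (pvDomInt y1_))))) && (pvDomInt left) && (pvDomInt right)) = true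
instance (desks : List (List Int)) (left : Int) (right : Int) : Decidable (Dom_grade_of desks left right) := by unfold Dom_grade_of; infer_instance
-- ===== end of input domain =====

-- B replaces A's two per-candidate full scans with one pass narrowing a candidate set
-- by intersection (objective: simpler). Equivalence is on the return value.

-- ===== PORT A =====
-- inner 'for i in range(left, right+1)' loop of A, for one candidate grade
def gradeCheck (desks : List (List Int)) (left : Int) (right : Int) (grade : Int) : Bool :=
  (PySem.List.pyRange left (right + 1) 1).foldl
    (fun ok i =>
      if PySem.List.pyGetD (PySem.List.pyGetD desks i []) 0 0 != grade &&
         PySem.List.pyGetD (PySem.List.pyGetD desks i []) 1 0 != grade then false else ok)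
    true

-- outer 'for grade in grades' loop of A with its early return
def gradeFirst (desks : List (List Int)) (left : Int) (right : Int) : List Int → Int
  | [] => 0
  | g :: gs => if gradeCheck desks left right g then g else gradeFirst desks left right gs

def grade_of (desks : List (List Int)) (left : Int) (right : Int) : Int :=
  let g0 := PySem.List.pyGetD (PySem.List.pyGetD desks left []) 0 0
  let g1 := PySem.List.pyGetD (PySem.List.pyGetD desks left []) 1 0
  gradeFirst desks left right (PySem.List.sorted [g0, g1] (fun x => x) false)

-- ===== PORT B =====
-- {desk[0], desk[1]}
def pairSet (desk : List Int) : PySem.Set Int :=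
  PySem.Set.ofList [PySem.List.pyGetD desk 0 0, PySem.List.pyGetD desk 1 0]

def grade_of_alt (desks : List (List Int)) (left : Int) (right : Int) : Int :=
  let cands0 : PySem.Set Int := pairSet (PySem.List.pyGetD desks left [])
  let cands := (PySem.List.slice desks (some left) (some (right + 1))).foldl
    (fun s desk => PySem.Set.inter s (pairSet desk)) cands0
  -- 'min(cands) if cands else 0': min? is none exactly on the empty set
  (PySem.List.min? cands (fun x => x)).getD 0

-- ===== PRECONDITION & SPEC =====
-- Pre_ excludes inputs where Python A raises IndexError (left or some visited i in
-- range(left,right+1) out of [0,len), or an accessed desk with fewer than two grades) and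
-- inputs with negative left or a very negative right, where A's negative-index wraparound
-- and B's slice clamping read accidentally different desks.
def Pre_grade_of (desks : List (List Int)) (left : Int) (right : Int) : Prop :=
  0 ≤ left ∧ left < (desks.length : Int) ∧
  (-1 ≤ right ∨ (desks.length : Int) + right + 1 ≤ left) ∧ right < (desks.length : Int) ∧
  2 ≤ (desks.getD left.toNat []).length ∧
  ∀ i ∈ PySem.List.pyRange left (right + 1) 1, 2 ≤ (desks.getD i.toNat []).length
instance (desks : List (List Int)) (left : Int) (right : Int) : Decidable (Pre_grade_of desks left right) := by unfold Pre_grade_of; infer_instance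

def pvWitness_grade_of : List (List Int) × Int × Int := ([[2, 1], [2, 3], [4, 2]], 0, 2)

def Spec_grade_of (desks : List (List Int)) (left : Int) (right : Int) (out : Int) : Prop := out = grade_of_alt desks left right
instance (desks : List (List Int)) (left : Int) (right : Int) (out : Int) : Decidable (Spec_grade_of desks left right out) := by unfold Spec_grade_of; infer_instance

-- ===== CLAIM (what is proved, stated in full; the proofs are below) =====
def Claim_equal_grade_of : Prop := ∀ (desks : List (List Int)) (left : Int) (right : Int), Dom_grade_of desks left right → Pre_grade_of desks left right → Spec_grade_of desks left right (grade_of desks left right)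

-- ===== LEMMAS AND PROOFS =====

-- an 'any' over range indices is an 'any' over the corresponding segment of the list
theorem range_any_eq_segment_any (desks : List (List Int)) (p : List Int → Bool) :
    ∀ (m j : Nat), j + m ≤ desks.length →
      ((PySem.List.pyRange (j : Int) ((j : Int) + (m : Int)) 1).any
        (fun i => p (PySem.List.pyGetD desks i []))) =
      (((desks.drop j).take m).any p) := by
  intro m
  induction m with
  | zero => intro j h; simp [PySem.List.pyRange_one_eq_nil]
  | succ m ih =>
    intro j h
    have hj : j < desks.length := by omega
    rw [PySem.List.pyRange_one_cons (by push_cast; omega)]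
    have hdrop : desks.drop j = desks[j] :: desks.drop (j + 1) :=
      List.drop_eq_getElem_cons hj
    rw [hdrop, List.take_succ_cons, List.any_cons]
    have hg : PySem.List.pyGetD desks (j : Int) [] = desks[j] := by
      rw [PySem.List.pyGetD_natCast]; exact List.getD_eq_getElem _ _ hj
    rw [hg]
    have : ((j : Int) + 1) = ((j + 1 : Nat) : Int) := by push_cast; ring
    rw [this]
    have : (j : Int) + ((m + 1 : Nat) : Int) = ((j + 1 : Nat) : Int) + (m : Int) := by
      push_cast; ring
    rw [this, ih (j + 1) (by omega)]
    simp

-- membership in B's intersection fold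
theorem mem_foldl_inter (E : List (List Int)) (x : Int) :
    ∀ (s : PySem.Set Int),
      (x ∈ E.foldl (fun s desk => PySem.Set.inter s (pairSet desk)) s) ↔
      (x ∈ s ∧ ∀ d ∈ E, x ∈ pairSet d) := by
  induction E with
  | nil => intro s; simp
  | cons d E ih =>
    intro s
    rw [List.foldl_cons, ih]
    rw [PySem.Set.mem_inter]
    constructor
    · rintro ⟨⟨hs, hd⟩, hrest⟩
      refine ⟨hs, fun e he => ?_⟩
      rcases List.mem_cons.mp he with h | h
      · rw [h]; exact hd
      · exact hrest e h
    · rintro ⟨hs, hall⟩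
      exact ⟨⟨hs, hall d (List.mem_cons_self)⟩, fun e he => hall e (List.mem_cons_of_mem _ he)⟩

theorem mem_pairSet (d : List Int) (x : Int) :
    x ∈ pairSet d ↔ (x = PySem.List.pyGetD d 0 0 ∨ x = PySem.List.pyGetD d 1 0) := by
  unfold pairSet
  rw [PySem.Set.mem_ofList]
  simp

-- the min of a two-candidate filtered set equals the first-passing-candidate scan
theorem min_core (S : List Int) (a b : Int) (chk : Int → Bool) (hab : a ≤ b)
    (hmem : ∀ x, x ∈ S ↔ ((x = a ∨ x = b) ∧ chk x = true)) :
    (PySem.List.min? S (fun x => x)).getD 0 =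
    (if chk a then a else if chk b then b else 0) := by
  by_cases ha : chk a = true
  · have haS : a ∈ S := (hmem a).mpr ⟨Or.inl rfl, ha⟩
    have hne : S ≠ [] := fun h => by simp [h] at haS
    cases hm : PySem.List.min? S (fun x => x) with
    | none => exact absurd ((PySem.List.min?_eq_none_iff S _).mp hm) hne
    | some m =>
      have hmS : m ∈ S := PySem.List.min?_mem hm
      have hma : m ≤ a := PySem.List.min?_isMin hm a haS
      have := (hmem m).mp hmS
      have hm_eq : m = a := by rcases this.1 with rfl | rfl; rfl; omega
      simp [ha, hm_eq]
  · by_cases hb : chk b = true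
    · have hbS : b ∈ S := (hmem b).mpr ⟨Or.inr rfl, hb⟩
      have hne : S ≠ [] := fun h => by simp [h] at hbS
      cases hm : PySem.List.min? S (fun x => x) with
      | none => exact absurd ((PySem.List.min?_eq_none_iff S _).mp hm) hne
      | some m =>
        have hmS : m ∈ S := PySem.List.min?_mem hm
        have := (hmem m).mp hmS
        have hm_eq : m = b := by
          rcases this.1 with rfl | rfl
          · exact absurd this.2 ha
          · rfl
        simp [ha, hb, hm_eq]
    · have hne : S = [] := by
        apply List.eq_nil_iff_forall_not_mem.mpr
        intro x hx
        have := (hmem x).mp hx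
        rcases this.1 with rfl | rfl
        · exact ha this.2
        · exact hb this.2
      simp [hne, PySem.List.min?, ha, hb]

-- gradeCheck is an 'all' over the slice A and B both visit
theorem gradeCheck_eq_all (desks : List (List Int)) (left right : Int)
    (h0 : 0 ≤ left) (hl : left < (desks.length : Int))
    (hlr : -1 ≤ right ∨ (desks.length : Int) + right + 1 ≤ left)
    (hr : right < (desks.length : Int)) (g : Int) :
    gradeCheck desks left right g =
      ((PySem.List.slice desks (some left) (some (right + 1))).all
        (fun d => PySem.List.pyGetD d 0 0 == g || PySem.List.pyGetD d 1 0 == g)) := by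
  by_cases hcase : left ≤ right + 1
  case neg =>
    have hempty : PySem.List.slice desks (some left) (some (right + 1)) = [] := by
      apply List.eq_nil_of_length_eq_zero
      rw [PySem.List.length_slice]
      unfold PySem.List.clampIdx
      split_ifs <;> omega
    unfold gradeCheck
    rw [PySem.List.pyRange_one_eq_nil (by omega), hempty]
    simp
  unfold gradeCheck
  rw [PySem.List.foldl_if_false_eq]
  have hcast1 : ((left.toNat : Int)) = left := Int.toNat_of_nonneg h0
  have hcast2 : ((left.toNat : Int)) + (((right + 1 - left).toNat : Int)) = right + 1 := by omega
  have hseg := range_any_eq_segment_any desks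
      (fun d => PySem.List.pyGetD d 0 0 != g && PySem.List.pyGetD d 1 0 != g)
      (right + 1 - left).toNat left.toNat (by omega)
  rw [hcast2, hcast1] at hseg
  rw [hseg, PySem.List.slice_toNat desks h0 (by omega)]
  have hm : (right + 1).toNat - left.toNat = (right + 1 - left).toNat := by omega
  rw [hm]
  simp only [Bool.true_and]
  rw [List.any_eq_not_all_not]
  simp [bne]

theorem cands_mem (desks : List (List Int)) (left right : Int)
    (h0 : 0 ≤ left) (hl : left < (desks.length : Int))
    (hlr : -1 ≤ right ∨ (desks.length : Int) + right + 1 ≤ left)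
    (hr : right < (desks.length : Int)) (x : Int) :
    (x ∈ (PySem.List.slice desks (some left) (some (right + 1))).foldl
          (fun s desk => PySem.Set.inter s (pairSet desk))
          (pairSet (PySem.List.pyGetD desks left []))) ↔
    ((x = PySem.List.pyGetD (PySem.List.pyGetD desks left []) 0 0 ∨
      x = PySem.List.pyGetD (PySem.List.pyGetD desks left []) 1 0) ∧
     gradeCheck desks left right x = true) := by
  rw [mem_foldl_inter, mem_pairSet, gradeCheck_eq_all desks left right h0 hl hlr hr]
  rw [List.all_eq_true]
  constructor
  · rintro ⟨h1, h2⟩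
    refine ⟨h1, fun d hd => ?_⟩
    rcases (mem_pairSet d x).mp (h2 d hd) with rfl | rfl <;> simp
  · rintro ⟨h1, h2⟩
    refine ⟨h1, fun d hd => ?_⟩
    have := h2 d hd
    rw [Bool.or_eq_true, beq_iff_eq, beq_iff_eq] at this
    exact (mem_pairSet d x).mpr (this.elim (fun h => Or.inl h.symm) (fun h => Or.inr h.symm))

-- ===== VERDICT (by name: the statement is the Claim_ definition above) =====
theorem grade_of_spec : Claim_equal_grade_of := by
  unfold Claim_equal_grade_of
  intro desks left right _ hpre
  obtain ⟨h0, hl, hlr, hr, _, _⟩ := hpre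
  simp only [Spec_grade_of, grade_of, grade_of_alt]
  set g0 := PySem.List.pyGetD (PySem.List.pyGetD desks left []) 0 0 with hg0
  set g1 := PySem.List.pyGetD (PySem.List.pyGetD desks left []) 1 0 with hg1
  have hmem := cands_mem desks left right h0 hl hlr hr
  by_cases hcmp : g0 ≤ g1
  · have hsort : PySem.List.sorted [g0, g1] (fun x => x) false = [g0, g1] := by
      simp [PySem.List.sorted_eq_foldl_insertBy, PySem.List.insertBy, hcmp]
    rw [hsort]
    rw [min_core _ g0 g1 (gradeCheck desks left right) hcmp (by intro x; exact hmem x)]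
    simp [gradeFirst]
  · have hsort : PySem.List.sorted [g0, g1] (fun x => x) false = [g1, g0] := by
      simp [PySem.List.sorted_eq_foldl_insertBy, PySem.List.insertBy, hcmp]
    rw [hsort]
    rw [min_core _ g1 g0 (gradeCheck desks left right) (by omega)
      (by intro x; rw [hmem x]; constructor <;> rintro ⟨h, h2⟩ <;> exact ⟨h.symm, h2⟩)]
    simp [gradeFirst]
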